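-- pv_equiv track=rewrite | github.com/Peter-worm/SNARS-competition | SourceCode/utils.py | map_from_1
-- ===== SOURCE A (Python) =====
-- def map_from_1(partition):
--     community_map = {}
--     mapping = {}
--
--     for index, val in enumerate(partition):
--         if val not in community_map:
--             community_map[val] = len(community_map) + 1
--         if index + 1 not in mapping:
--             mapping[index + 1] = f"number_of_cluster_containing_{community_map[val]}"
--     return mapping
-- ===== SOURCE B (Python) =====
-- def map_from_1(partition):
--     def rank(v):
--         return len(set(partition[:partition.index(v) + 1]))
--     return {i + 1: f"number_of_cluster_containing_{rank(v)}"
--             for i, v in enumerate(partition)}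
-- ===== Notes on version B (the rewrite author's own statement) =====
-- stated objective: alternative
-- what changed: Eliminates both dicts of A's interleaved loop: B computes each element's cluster number directly as len(set(partition[:partition.index(v)+1])) - the count of distinct labels up to v's first occurrence - instead of numbering labels incrementally with a growing community_map; it trades A's O(n) single pass for an O(n^2) per-value closed form.
import Mathlib
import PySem

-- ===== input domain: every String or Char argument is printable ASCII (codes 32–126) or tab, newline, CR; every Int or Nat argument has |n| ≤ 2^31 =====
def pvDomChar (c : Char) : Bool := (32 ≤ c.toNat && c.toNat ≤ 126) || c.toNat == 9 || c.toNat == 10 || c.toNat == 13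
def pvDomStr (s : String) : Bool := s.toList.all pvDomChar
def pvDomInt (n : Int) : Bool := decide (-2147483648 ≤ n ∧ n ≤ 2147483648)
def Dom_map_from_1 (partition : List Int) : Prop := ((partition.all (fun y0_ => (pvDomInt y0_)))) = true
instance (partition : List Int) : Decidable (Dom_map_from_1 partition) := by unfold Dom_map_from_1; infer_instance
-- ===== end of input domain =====

-- B removes A's two interleaved dicts entirely: each cluster number is computed directly as the
-- count of distinct labels in the prefix ending at that label's first occurrence; objective: alternative.

-- ===== PORT A =====
-- A-side helper: the body of A's loop (updates community_map and mapping together).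
def pvStepA (st : PySem.Dict Int Int × PySem.Dict Int String) (iv : Int × Int) :
    PySem.Dict Int Int × PySem.Dict Int String :=
  let cm := if st.1.contains iv.2 = false then st.1.insert iv.2 ((st.1.size : Int) + 1) else st.1
  -- community_map[val]: val is always a key of cm at this point, so KeyError is unreachable; getD's default is never used
  let mp := if st.2.contains (iv.1 + 1) = false then
      st.2.insert (iv.1 + 1) ("number_of_cluster_containing_" ++ PySem.Int.toStr (cm.getD iv.2 0))
    else st.2
  (cm, mp)

def map_from_1 (partition : List Int) : List (Int × String) :=
  (((PySem.List.enumerate partition).foldl pvStepA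
      ((PySem.Dict.empty : PySem.Dict Int Int), (PySem.Dict.empty : PySem.Dict Int String))).2).items

-- ===== PORT B =====
def map_from_1_alt (partition : List Int) : List (Int × String) :=
  -- def rank(v): return len(set(partition[:partition.index(v) + 1]))
  -- partition.index(v): v ∈ partition at every call site, so ValueError is unreachable; getD's default is never used
  let rank : Int → Int := fun v =>
    PySem.Set.len (PySem.Set.ofList
      (PySem.List.slice partition none
        (some ((((PySem.List.index? partition v).getD 0 : Nat) : Int) + 1))))
  -- {i + 1: f"number_of_cluster_containing_{rank(v)}" for i, v in enumerate(partition)}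
  ((PySem.List.enumerate partition).foldl
      (fun d p => d.insert (p.1 + 1)
        ("number_of_cluster_containing_" ++ PySem.Int.toStr (rank p.2)))
      (PySem.Dict.empty : PySem.Dict Int String)).items

-- ===== PRECONDITION & SPEC =====
def Spec_map_from_1 (partition : List Int) (out : List (Int × String)) : Prop := out = map_from_1_alt partition
instance (partition : List Int) (out : List (Int × String)) : Decidable (Spec_map_from_1 partition out) := by unfold Spec_map_from_1; infer_instance

-- ===== CLAIM (what is proved, stated in full; the proofs are below) =====
def Claim_equal_map_from_1 : Prop := ∀ (partition : List Int), Dom_map_from_1 partition → Spec_map_from_1 partition (map_from_1 partition)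

-- ===== LEMMAS AND PROOFS =====

/-- 1-based rank of `v` among the distinct labels of `xs` in first-seen order. -/
def pvRank (xs : List Int) (v : Int) : Int := ((PySem.List.dedup xs).idxOf v : Int) + 1

def pvStr (n : Int) : String := "number_of_cluster_containing_" ++ PySem.Int.toStr n

/-- A's community_map loop, isolated. -/
def pvCM (xs : List Int) : PySem.Dict Int Int :=
  xs.foldl (fun d v => if d.contains v = false then d.insert v ((d.size : Int) + 1) else d)
    PySem.Dict.empty

/-- The items list A's label→id dict carries. -/
def pvIdsItems (xs : List Int) : List (Int × Int) :=
  (PySem.List.enumerate (PySem.List.dedup xs) 0).map (fun p => (p.2, p.1 + 1))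

lemma pv_enum_fst_lt {α : Type} (xs : List α) (s : Int) (p : Int × α)
    (h : p ∈ PySem.List.enumerate xs s) : s ≤ p.1 ∧ p.1 < s + xs.length := by
  induction xs generalizing s with
  | nil => simp [PySem.List.enumerate_nil] at h
  | cons x xs ih =>
    rw [PySem.List.enumerate_cons] at h
    rcases List.mem_cons.1 h with h1 | h1
    · subst h1; simp
    · have := ih (s + 1) h1; simp only [List.length_cons]; push_cast; omega

lemma pv_enum_snoc {α : Type} (l : List α) (x : α) (s : Int) :
    PySem.List.enumerate (l ++ [x]) s
      = PySem.List.enumerate l s ++ [(s + l.length, x)] := by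
  induction l generalizing s with
  | nil => simp [PySem.List.enumerate_nil, PySem.List.enumerate_cons]
  | cons y l ih =>
    simp only [List.cons_append, PySem.List.enumerate_cons, ih, List.length_cons]
    congr 2
    push_cast; ring_nf

lemma pv_mem_of_mem_enum {α : Type} (xs : List α) (s : Int) (p : Int × α)
    (h : p ∈ PySem.List.enumerate xs s) : p.2 ∈ xs := by
  have : p.2 ∈ (PySem.List.enumerate xs s).map (fun q => q.2) := List.mem_map_of_mem h
  rwa [PySem.List.map_snd_enumerate] at this

lemma pv_insert_items {κ ν : Type} [BEq κ] (d : PySem.Dict κ ν) (k : κ) (v : ν)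
    (h : d.contains k = false) : (d.insert k v).items = d.items ++ [(k, v)] := by
  simp [PySem.Dict.insert, h]

lemma pv_dedup_snoc (xs : List Int) (x : Int) :
    PySem.Set.ofList (xs ++ [x])
      = if x ∈ xs then PySem.Set.ofList xs else PySem.Set.ofList xs ++ [x] := by
  have h : PySem.Set.ofList (xs ++ [x]) = PySem.Set.add (PySem.Set.ofList xs) x := by
    simp [PySem.Set.ofList, List.foldl_append]
  have hm : (PySem.Set.ofList xs).contains x = decide (x ∈ xs) := by
    have := PySem.List.mem_dedup xs x
    simp only [PySem.List.dedup] at this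
    simp [this]
  rw [h, PySem.Set.add, hm]
  by_cases hx : x ∈ xs
  · simp [hx]
  · simp [hx]

lemma pv_dedup_prefix_aux (ys s : List Int) :
    ∃ t, ys.foldl PySem.Set.add s = s ++ t := by
  induction ys generalizing s with
  | nil => exact ⟨[], by simp⟩
  | cons y ys ih =>
    have hadd : PySem.Set.add s y = s ∨ PySem.Set.add s y = s ++ [y] := by
      rw [PySem.Set.add]
      by_cases hc : PySem.Set.contains s y = true
      · left; rw [if_pos hc]
      · right; rw [if_neg hc]
    rcases hadd with h | h
    · rw [List.foldl_cons, h]; exact ih s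
    · rw [List.foldl_cons, h]
      rcases ih (s ++ [y]) with ⟨t, ht⟩
      exact ⟨y :: t, by rw [ht]; simp⟩

lemma pv_rank_stable (xs ys : List Int) (v : Int) (hv : v ∈ xs) :
    pvRank (xs ++ ys) v = pvRank xs v := by
  have hmem : v ∈ PySem.List.dedup xs := (PySem.List.mem_dedup xs v).2 hv
  have h1 : PySem.List.dedup (xs ++ ys) = ys.foldl PySem.Set.add (PySem.List.dedup xs) := by
    simp [PySem.List.dedup, PySem.Set.ofList, List.foldl_append]
  rcases pv_dedup_prefix_aux ys (PySem.List.dedup xs) with ⟨t, ht⟩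
  unfold pvRank
  rw [h1, ht, List.idxOf_append_of_mem hmem]

lemma pv_cm_items (xs : List Int) : (pvCM xs).items = pvIdsItems xs := by
  induction xs using List.reverseRecOn with
  | nil => rfl
  | append_singleton xs x ih =>
    have hstep : pvCM (xs ++ [x])
        = (if (pvCM xs).contains x = false
            then (pvCM xs).insert x (((pvCM xs).size : Int) + 1) else pvCM xs) := by
      simp [pvCM, List.foldl_append]
    have hcont : (pvCM xs).contains x = decide (x ∈ xs) := by
      rw [PySem.Dict.contains, ih]
      simp only [pvIdsItems, List.any_map]
      rw [show ((fun p : Int × Int => p.1 == x) ∘ (fun p : Int × Int => (p.2, p.1 + 1)))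
            = ((fun a : Int => a == x) ∘ (fun p : Int × Int => p.2)) from rfl,
        ← List.any_map, PySem.List.map_snd_enumerate]
      have hmem := PySem.List.mem_dedup xs x
      by_cases hx : x ∈ xs
      · simp only [hx, decide_true, List.any_eq_true]
        exact ⟨x, hmem.2 hx, by simp⟩
      · simp only [hx, decide_false, List.any_eq_false]
        intro a ha
        simp only [beq_iff_eq]
        intro heq
        exact hx (hmem.1 (heq ▸ ha))
    by_cases hx : x ∈ xs
    · rw [hstep, hcont]
      simp only [hx, decide_true]
      simp [ih, pvIdsItems, pv_dedup_snoc, hx]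
    · have hc : (pvCM xs).contains x = false := by rw [hcont]; simp [hx]
      rw [hstep, hc]
      rw [if_pos rfl]
      rw [pv_insert_items _ _ _ hc, ih]
      have hsize : ((pvCM xs).size : Int) = ((PySem.List.dedup xs).length : Int) := by
        simp [PySem.Dict.size, ih, pvIdsItems, PySem.List.length_enumerate]
      rw [hsize]
      simp [pvIdsItems, pv_dedup_snoc, hx, pv_enum_snoc]

lemma pv_get_assoc (l : List Int) (s v : Int) :
    (PySem.Dict.mk ((PySem.List.enumerate l s).map (fun p => (p.2, p.1 + 1)))).get? v
      = if v ∈ l then some (s + (l.idxOf v : Int) + 1) else none := by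
  induction l generalizing s with
  | nil => simp [PySem.List.enumerate_nil, PySem.Dict.get?]
  | cons x l ih =>
    rw [PySem.List.enumerate_cons]
    simp only [List.map_cons]
    rw [PySem.Dict.get?_mk_cons]
    by_cases hxv : x = v
    · subst hxv
      simp [List.idxOf_cons_self]
    · have hbeq : (x == v) = false := by simp [hxv]
      rw [hbeq]
      simp only [Bool.false_eq_true, if_false, ih (s + 1)]
      by_cases hv : v ∈ l
      · have hidx : (x :: l).idxOf v = l.idxOf v + 1 := List.idxOf_cons_ne l hxv
        simp [hv, hidx]
        ring
      · simp [hv, Ne.symm hxv]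

lemma pv_cm_getD (xs : List Int) (v : Int) (hv : v ∈ xs) :
    (pvCM xs).getD v 0 = pvRank xs v := by
  have hd : pvCM xs = PySem.Dict.mk (pvIdsItems xs) := PySem.Dict.ext (pv_cm_items xs)
  rw [PySem.Dict.getD, hd]
  rw [show PySem.Dict.mk (pvIdsItems xs)
        = PySem.Dict.mk ((PySem.List.enumerate (PySem.List.dedup xs) 0).map (fun p => (p.2, p.1 + 1))) from rfl]
  rw [pv_get_assoc]
  simp [hv, pvRank]

lemma pv_mp_fresh (seen : List Int) (f : Int × Int → String) :
    (PySem.Dict.mk ((PySem.List.enumerate seen 0).map (fun p => (p.1 + 1, f p)))).contains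
      ((seen.length : Int) + 1) = false := by
  simp only [PySem.Dict.contains, List.any_map, List.any_eq_false, Function.comp]
  intro p hp
  have h := pv_enum_fst_lt seen 0 p hp
  simp only [beq_iff_eq]
  omega

lemma pv_loop (rest : List Int) : ∀ seen : List Int,
    (PySem.List.enumerate rest (seen.length : Int)).foldl pvStepA
      (pvCM seen,
       PySem.Dict.mk ((PySem.List.enumerate seen 0).map
         (fun p => (p.1 + 1, pvStr (pvRank (seen ++ rest) p.2)))))
    = (pvCM (seen ++ rest),
       PySem.Dict.mk ((PySem.List.enumerate (seen ++ rest) 0).map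
         (fun p => (p.1 + 1, pvStr (pvRank (seen ++ rest) p.2))))) := by
  induction rest with
  | nil => intro seen; simp [PySem.List.enumerate_nil]
  | cons x rest ih =>
    intro seen
    rw [PySem.List.enumerate_cons, List.foldl_cons]
    have hval : (pvCM (seen ++ [x])).getD x 0 = pvRank (seen ++ x :: rest) x := by
      rw [pv_cm_getD (seen ++ [x]) x (by simp)]
      rw [show seen ++ x :: rest = (seen ++ [x]) ++ rest by simp]
      exact (pv_rank_stable (seen ++ [x]) rest x (by simp)).symm
    have hstep : pvStepA (pvCM seen,
        PySem.Dict.mk ((PySem.List.enumerate seen 0).map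
          (fun p => (p.1 + 1, pvStr (pvRank (seen ++ x :: rest) p.2)))))
        ((seen.length : Int), x)
        = (pvCM (seen ++ [x]),
           PySem.Dict.mk ((PySem.List.enumerate (seen ++ [x]) 0).map
             (fun p => (p.1 + 1, pvStr (pvRank (seen ++ x :: rest) p.2))))) := by
      unfold pvStepA
      simp only []
      rw [pv_mp_fresh]
      rw [if_pos rfl]
      have hcmeq : (if (pvCM seen).contains x = false
          then (pvCM seen).insert x (((pvCM seen).size : Int) + 1) else pvCM seen)
          = pvCM (seen ++ [x]) := by
        simp [pvCM, List.foldl_append]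
      refine Prod.ext hcmeq ?_
      apply PySem.Dict.ext
      rw [pv_insert_items _ _ _ (pv_mp_fresh seen _)]
      rw [hcmeq, hval]
      simp only [pv_enum_snoc, List.map_append, List.map_cons, List.map_nil]
      simp [pvStr]
    rw [hstep]
    have hlen : ((seen.length : Int) + 1) = (((seen ++ [x]).length : Nat) : Int) := by
      simp
    rw [hlen]
    have := ih (seen ++ [x])
    rw [show (seen ++ [x]) ++ rest = seen ++ x :: rest by simp] at this
    rw [this]

lemma pv_out_fold (xs : List Int) (g : Int → String) :
    ∀ (s : Int) (d0 : PySem.Dict Int String),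
    (∀ i : Int, s ≤ i → d0.contains (i + 1) = false) →
    (PySem.List.enumerate xs s).foldl (fun d p => d.insert (p.1 + 1) (g p.2)) d0
      = PySem.Dict.mk (d0.items ++ (PySem.List.enumerate xs s).map (fun p => (p.1 + 1, g p.2))) := by
  induction xs with
  | nil => intro s d0 _; simp [PySem.List.enumerate_nil]
  | cons x xs ih =>
    intro s d0 hd
    rw [PySem.List.enumerate_cons, List.foldl_cons]
    have hc := hd s le_rfl
    have hnew : ∀ i : Int, s + 1 ≤ i → (d0.insert (s + 1) (g x)).contains (i + 1) = false := by
      intro i hi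
      rw [PySem.Dict.contains_insert]
      have h1 : ((i + 1 : Int) == s + 1) = false := by simp; omega
      have h2 := hd i (by omega)
      simp [h1, h2]
    rw [ih (s + 1) _ hnew]
    rw [pv_insert_items _ _ _ hc]
    simp

lemma pv_A_char (partition : List Int) :
    map_from_1 partition
      = (PySem.List.enumerate partition 0).map
          (fun p => (p.1 + 1, pvStr (pvRank partition p.2))) := by
  unfold map_from_1
  have h0 : (PySem.Dict.empty : PySem.Dict Int Int) = pvCM [] := rfl
  have h1 : (PySem.Dict.empty : PySem.Dict Int String)
      = PySem.Dict.mk ((PySem.List.enumerate ([] : List Int) 0).map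
          (fun p => (p.1 + 1, pvStr (pvRank (([] : List Int) ++ partition) p.2)))) := by
    simp [PySem.List.enumerate_nil, PySem.Dict.empty]
  rw [show PySem.List.enumerate partition
        = PySem.List.enumerate partition (((([] : List Int)).length : Nat) : Int) from rfl]
  rw [h0, h1, pv_loop partition []]
  simp

/-- B's per-value closed form (distinct count of the prefix through the first occurrence)
equals the first-seen rank. -/
lemma pv_rankB (xs : List Int) (v : Int) (hv : v ∈ xs) :
    PySem.Set.len (PySem.Set.ofList
      (PySem.List.slice xs none
        (some ((((PySem.List.index? xs v).getD 0 : Nat) : Int) + 1))))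
      = pvRank xs v := by
  obtain ⟨k, hk⟩ : ∃ k, PySem.List.index? xs v = some k := by
    have := (PySem.List.index?_isSome_iff xs v).2 hv
    exact Option.isSome_iff_exists.1 this
  obtain ⟨hklt, hxk, hmin⟩ := PySem.List.getElem_of_index?_eq_some hk
  rw [hk]
  simp only [Option.getD_some]
  rw [show (((k : Nat) : Int) + 1) = (((k + 1 : Nat) : Nat) : Int) by push_cast; ring]
  rw [PySem.List.slice_to_natCast]
  -- xs.take (k+1) = xs.take k ++ [v], and v ∉ xs.take k
  have htk : xs.take (k + 1) = xs.take k ++ [v] := by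
    rw [List.take_add_one]
    simp [List.getElem?_eq_getElem hklt, hxk]
  have hnm : v ∉ xs.take k := by
    intro hmem
    obtain ⟨j, hj, hje⟩ := List.mem_iff_getElem.1 hmem
    have hjk : j < k := lt_of_lt_of_le hj (by simp [List.length_take])
    have : xs[j]'(lt_of_lt_of_le hjk (le_of_lt hklt)) = v := by
      rw [← hje]; simp [List.getElem_take]
    exact hmin j hjk this
  have hset : PySem.Set.ofList (xs.take (k + 1))
      = PySem.Set.ofList (xs.take k) ++ [v] := by
    rw [htk, pv_dedup_snoc, if_neg hnm]
  -- the rank side: xs = take (k+1) ++ drop (k+1)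
  have hvtk : v ∈ xs.take (k + 1) := by rw [htk]; simp
  have hr1 : pvRank xs v = pvRank (xs.take (k + 1)) v := by
    conv_lhs => rw [← List.take_append_drop (k + 1) xs]
    exact pv_rank_stable _ _ v hvtk
  have hnd : v ∉ PySem.List.dedup (xs.take k) := by
    intro h; exact hnm ((PySem.List.mem_dedup _ _).1 h)
  have hr2 : pvRank (xs.take (k + 1)) v
      = ((PySem.List.dedup (xs.take k)).length : Int) + 1 := by
    unfold pvRank
    have hdd : PySem.List.dedup (xs.take (k + 1))
        = PySem.List.dedup (xs.take k) ++ [v] := by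
      simp only [PySem.List.dedup]
      exact hset
    rw [hdd, List.idxOf_append_of_notMem hnd]
    simp
  rw [hr1, hr2, hset]
  simp [PySem.Set.len, PySem.List.dedup]

lemma pv_B_char (partition : List Int) :
    map_from_1_alt partition
      = (PySem.List.enumerate partition 0).map
          (fun p => (p.1 + 1, pvStr (pvRank partition p.2))) := by
  unfold map_from_1_alt
  simp only []
  rw [pv_out_fold partition
    (fun v => "number_of_cluster_containing_" ++ PySem.Int.toStr
      (PySem.Set.len (PySem.Set.ofList (PySem.List.slice partition none
        (some ((((PySem.List.index? partition v).getD 0 : Nat) : Int) + 1))))))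
    0 PySem.Dict.empty (by intro i _; rfl)]
  simp only [PySem.Dict.empty, List.nil_append]
  apply List.map_congr_left
  intro p hp
  have hv : p.2 ∈ partition := pv_mem_of_mem_enum partition 0 p hp
  rw [pv_rankB partition p.2 hv]
  rfl

-- ===== VERDICT (by name: the statement is the Claim_ definition above) =====
theorem map_from_1_spec : Claim_equal_map_from_1 := by
  intro partition _
  unfold Spec_map_from_1
  rw [pv_A_char, pv_B_char]
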